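-- pv_equiv track=rewrite | github.com/k-harada/AtCoder | ADT/20231024/C.py | solve
-- ===== SOURCE A (Python) =====
-- def solve(a, b):
--     m_a = len(str(a))
--     m_b = len(str(b))
--     a_add = "0" * max(m_b - m_a, 0) + str(a)
--     b_add = "0" * max(m_a - m_b, 0) + str(b)
--     for i in range(max(m_a, m_b)):
--         if int(a_add[i]) + int(b_add[i]) >= 10:
--             return "Hard"
--     return "Easy"
-- ===== SOURCE B (Python) =====
-- def solve(a, b):
--     # Arithmetic digit extraction, LSB-first; no string conversion or padding.
--     while a or b:
--         if a % 10 + b % 10 >= 10: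
--             return "Hard"
--         a //= 10
--         b //= 10
--     return "Easy"
-- ===== Notes on version B (the rewrite author's own statement) =====
-- stated objective: idiomatic
-- what changed: Replaces string conversion, zero-padding and an MSB-first indexed scan with a while-loop extracting digits arithmetically (divmod, LSB-first).
import Mathlib
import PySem

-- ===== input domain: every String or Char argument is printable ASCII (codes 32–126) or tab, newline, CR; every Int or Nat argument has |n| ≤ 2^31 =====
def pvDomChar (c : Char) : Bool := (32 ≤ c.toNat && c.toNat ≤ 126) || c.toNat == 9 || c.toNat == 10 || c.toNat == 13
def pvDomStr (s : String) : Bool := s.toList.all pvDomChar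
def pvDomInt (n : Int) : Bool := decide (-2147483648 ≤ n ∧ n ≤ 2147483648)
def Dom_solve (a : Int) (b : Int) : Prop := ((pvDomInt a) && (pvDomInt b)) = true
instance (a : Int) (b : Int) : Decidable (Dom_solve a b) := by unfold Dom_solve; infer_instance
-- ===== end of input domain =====

-- B replaces string conversion/padding/MSB scan with arithmetic LSB-first digit extraction (objective: idiomatic).

-- ===== PORT A =====
-- the 'for i in range(...)' loop with its early return "Hard"
def solveLoopA (aadd badd : List Char) : List Int → String
  | [] => "Easy"
  | i :: rest =>
    if 10 ≤ (PySem.Int.ofChars? [PySem.List.pyGetD aadd i ' ']).getD 0 +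
            (PySem.Int.ofChars? [PySem.List.pyGetD badd i ' ']).getD 0
    then "Hard" else solveLoopA aadd badd rest

def solve (a : Int) (b : Int) : String :=
  let sa := PySem.Int.toChars a
  let sb := PySem.Int.toChars b
  let ma : Int := PySem.List.len sa
  let mb : Int := PySem.List.len sb
  let aadd := List.replicate (max (mb - ma) 0).toNat '0' ++ sa
  let badd := List.replicate (max (ma - mb) 0).toNat '0' ++ sb
  solveLoopA aadd badd (PySem.List.pyRange 0 (max ma mb) 1)

-- ===== PORT B =====
-- the 'while a or b' loop; fuel only makes the recursion total (Python B diverges on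
-- negative inputs, which Pre_solve excludes; under Pre_ the fuel is never exhausted)
def solveLoopB : Nat → Int → Int → String
  | 0, _, _ => "Easy"
  | f + 1, a, b =>
    if a ≠ 0 ∨ b ≠ 0 then
      if 10 ≤ PySem.Int.mod a 10 + PySem.Int.mod b 10 then "Hard"
      else solveLoopB f (PySem.Int.floordiv a 10) (PySem.Int.floordiv b 10)
    else "Easy"

def solve_alt (a : Int) (b : Int) : String := solveLoopB (a.natAbs + b.natAbs + 1) a b

-- ===== PRECONDITION & SPEC =====
-- A raises ValueError (int('-')) whenever a or b is negative; Pre_ admits exactly the inputs A returns on.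
def Pre_solve (a : Int) (b : Int) : Prop := 0 ≤ a ∧ 0 ≤ b
instance (a : Int) (b : Int) : Decidable (Pre_solve a b) := by unfold Pre_solve; infer_instance
def pvWitness_solve : Int × Int := (27, 185)

def Spec_solve (a : Int) (b : Int) (out : String) : Prop := out = solve_alt a b
instance (a : Int) (b : Int) (out : String) : Decidable (Spec_solve a b out) := by unfold Spec_solve; infer_instance

-- ===== CLAIM (what is proved, stated in full; the proofs are below) =====
def Claim_equal_solve : Prop := ∀ (a : Int) (b : Int), Dom_solve a b → Pre_solve a b → Spec_solve a b (solve a b)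

-- ===== LEMMAS AND PROOFS =====

-- k-th decimal digit of n, least-significant first
def dig (n k : Nat) : Nat := n / 10 ^ k % 10

-- MSB-first decimal digit list (what str(n) spells for n ≥ 0)
def msb (n : Nat) : List Nat :=
  if n < 10 then [n] else msb (n / 10) ++ [n % 10]
decreasing_by exact Nat.div_lt_self (by omega) (by omega)

-- bounded "some digit pair sums to ≥ 10"
def hardN (na nb L : Nat) : Bool := (List.range L).any fun k => 10 ≤ dig na k + dig nb k

theorem toDigitsCore_succ (f n : Nat) (l : List Char) :
    Nat.toDigitsCore 10 (f + 1) n l =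
      if n / 10 = 0 then Nat.digitChar (n % 10) :: l
      else Nat.toDigitsCore 10 f (n / 10) (Nat.digitChar (n % 10) :: l) := by
  rw [Nat.toDigitsCore]

theorem msb_toDigitsCore (f : Nat) : ∀ (n : Nat) (l : List Char), n < 10 ^ f →
    Nat.toDigitsCore 10 (f + 1) n l = (msb n).map Nat.digitChar ++ l := by
  induction f with
  | zero =>
    intro n l h
    have hn0 : n = 0 := by omega
    subst hn0
    rw [toDigitsCore_succ]
    simp [msb]
  | succ f ih =>
    intro n l h
    rw [toDigitsCore_succ]
    by_cases h0 : n / 10 = 0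
    · have hn : n < 10 := by omega
      rw [if_pos h0, msb, if_pos hn, Nat.mod_eq_of_lt hn]
      simp
    · have hn : ¬ n < 10 := by omega
      have hf : n / 10 < 10 ^ f := by
        have hp : 10 ^ (f + 1) = 10 ^ f * 10 := by ring
        omega
      rcases f with _ | f
      · omega
      · rw [if_neg h0, msb, if_neg hn, ih (n / 10) _ hf]
        simp

theorem toChars_nonneg (a : Int) (ha : 0 ≤ a) :
    PySem.Int.toChars a = (msb a.toNat).map Nat.digitChar := by
  rw [PySem.Int.toChars, if_neg (by omega), Nat.toDigits]
  have h : a.toNat < 10 ^ a.toNat :=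
    Nat.lt_of_lt_of_le Nat.lt_two_pow_self (Nat.pow_le_pow_left (by omega) _)
  simpa using msb_toDigitsCore a.toNat a.toNat [] h

theorem msb_reverse (n : Nat) :
    (msb n).reverse = (List.range (msb n).length).map (dig n) := by
  rw [msb]
  split
  · rename_i h
    simp [dig, Nat.mod_eq_of_lt h]
  · rename_i h
    have ih := msb_reverse (n / 10)
    simp only [List.reverse_append, List.reverse_singleton, List.length_append,
      List.length_singleton, ih]
    rw [List.range_succ_eq_map]
    simp only [List.map_cons, List.map_map, List.singleton_append]
    congr 1
    · simp [dig]
    · apply List.map_congr_left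
      intro k _
      show dig (n / 10) k = dig n (k + 1)
      simp [dig, Nat.div_div_eq_div_mul, pow_succ, Nat.mul_comm]
termination_by n
decreasing_by exact Nat.div_lt_self (by omega) (by omega)

theorem lt_pow_len_msb (n : Nat) : n < 10 ^ (msb n).length := by
  rw [msb]
  split
  · rename_i h; simpa using by omega
  · rename_i h
    have ih := lt_pow_len_msb (n / 10)
    simp only [List.length_append, List.length_singleton]
    have : 10 ^ ((msb (n / 10)).length + 1) = 10 ^ (msb (n / 10)).length * 10 := by ring
    omega
termination_by n
decreasing_by exact Nat.div_lt_self (by omega) (by omega)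

theorem dig_vanish {n m k : Nat} (h : n < 10 ^ m) (hk : m ≤ k) : dig n k = 0 := by
  have : n < 10 ^ k := h.trans_le (Nat.pow_le_pow_right (by omega) hk)
  simp [dig, Nat.div_eq_of_lt this]

theorem padded_eq (n L : Nat) (hL : (msb n).length ≤ L) :
    List.replicate (L - (msb n).length) 0 ++ msb n = (((List.range L).map (dig n))).reverse := by
  have h1 : (List.range L).map (dig n)
      = (List.range (msb n).length).map (dig n) ++ List.replicate (L - (msb n).length) 0 := by
    have : L = (msb n).length + (L - (msb n).length) := by omega
    rw [this, List.range_add, List.map_append]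
    congr 1
    rw [List.eq_replicate_iff]
    constructor
    · simp
    · intro x hx
      simp only [List.mem_map, List.mem_range] at hx
      obtain ⟨k, _, rfl⟩ := hx
      exact dig_vanish (lt_pow_len_msb n) (by omega)
  rw [h1, List.reverse_append, ← msb_reverse, List.reverse_reverse]
  simp

theorem val_digitChar (d : Nat) (hd : d < 10) :
    (PySem.Int.ofChars? [Nat.digitChar d]).getD 0 = (d : Int) := by
  interval_cases d <;> decide

theorem loopA_any (xs ys : List Char) (is : List Int) :
    solveLoopA xs ys is =
      if is.any (fun i => 10 ≤ (PySem.Int.ofChars? [PySem.List.pyGetD xs i ' ']).getD 0 +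
          (PySem.Int.ofChars? [PySem.List.pyGetD ys i ' ']).getD 0)
      then "Hard" else "Easy" := by
  induction is with
  | nil => simp [solveLoopA]
  | cons i rest ih =>
    rw [solveLoopA]
    by_cases h : 10 ≤ (PySem.Int.ofChars? [PySem.List.pyGetD xs i ' ']).getD 0 +
        (PySem.Int.ofChars? [PySem.List.pyGetD ys i ' ']).getD 0
    · simp [h]
    · simp [h, ih]

theorem pyGetD_padded (n L : Nat) (hn : (msb n).length ≤ L) (i : Nat) (hi : i < L) :
    PySem.List.pyGetD (List.replicate (L - (msb n).length) '0' ++ (msb n).map Nat.digitChar)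
      (i : Int) ' ' = Nat.digitChar (dig n (L - 1 - i)) := by
  have hrep : List.replicate (L - (msb n).length) '0'
      = (List.replicate (L - (msb n).length) (0 : Nat)).map Nat.digitChar := by
    rw [List.map_replicate]
    simp [Nat.digitChar]
  rw [PySem.List.pyGetD_natCast, hrep, ← List.map_append, padded_eq n L hn, ← List.map_reverse]
  rw [List.getD_eq_getElem _ _ (by simp; omega)]
  simp [List.getElem_reverse, List.getElem_range]

theorem dig_lt (n k : Nat) : dig n k < 10 := Nat.mod_lt _ (by omega)

theorem dig_succ (n k : Nat) : dig n (k + 1) = dig (n / 10) k := by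
  simp [dig, Nat.div_div_eq_div_mul, pow_succ, Nat.mul_comm]

theorem solve_char (a b : Int) (ha : 0 ≤ a) (hb : 0 ≤ b) :
    solve a b = if hardN a.toNat b.toNat (max (msb a.toNat).length (msb b.toNat).length)
      then "Hard" else "Easy" := by
  set na := a.toNat with hna
  set nb := b.toNat with hnb
  set la := (msb na).length with hladef
  set lb := (msb nb).length with hlbdef
  set L := max la lb with hLdef
  have hla : la ≤ L := le_max_left _ _
  have hlb : lb ≤ L := le_max_right _ _
  rw [solve]
  simp only [toChars_nonneg a ha, toChars_nonneg b hb, PySem.List.len_eq, List.length_map,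
    ← hna, ← hnb, ← hladef, ← hlbdef]
  have hmax : max ((la : Int)) ((lb : Int)) = ((L : Int)) := by
    rw [hLdef]; push_cast; rfl
  have haadd : (max ((lb : Int) - (la : Int)) 0).toNat = L - la := by omega
  have hbadd : (max ((la : Int) - (lb : Int)) 0).toNat = L - lb := by omega
  rw [hmax, haadd, hbadd, PySem.List.pyRange_zero_natCast, loopA_any, List.any_map]
  congr 1
  rw [eq_iff_iff]
  simp only [hardN, List.any_eq_true, Function.comp, List.mem_range, decide_eq_true_eq]
  constructor
  · rintro ⟨i, hi, hP⟩
    rw [pyGetD_padded na L hla i hi, pyGetD_padded nb L hlb i hi,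
      val_digitChar _ (dig_lt _ _), val_digitChar _ (dig_lt _ _)] at hP
    exact ⟨L - 1 - i, by omega, by exact_mod_cast hP⟩
  · rintro ⟨k, hk, hP⟩
    have hi : L - 1 - k < L := by omega
    refine ⟨L - 1 - k, hi, ?_⟩
    rw [pyGetD_padded na L hla _ hi, pyGetD_padded nb L hlb _ hi,
      val_digitChar _ (dig_lt _ _), val_digitChar _ (dig_lt _ _)]
    have hkk : L - 1 - (L - 1 - k) = k := by omega
    rw [hkk]
    exact_mod_cast hP

theorem loopB_char (f : Nat) : ∀ (na nb : Nat), na < 10 ^ f → nb < 10 ^ f →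
    solveLoopB f (na : Int) (nb : Int) = if hardN na nb f then "Hard" else "Easy" := by
  induction f with
  | zero =>
    intro na nb hna hnb
    have : na = 0 ∧ nb = 0 := by constructor <;> omega
    simp [solveLoopB, hardN, this.1, this.2]
  | succ f ih =>
    intro na nb hna hnb
    rw [solveLoopB]
    by_cases h0 : na = 0 ∧ nb = 0
    · rw [if_neg (by simp [h0.1, h0.2])]
      have : hardN 0 0 (f + 1) = false := by
        simp [hardN, dig]
      simp [h0.1, h0.2, this]
    · rw [if_pos (by
        rcases Nat.eq_zero_or_pos na with h | h
        · right; have : nb ≠ 0 := by tauto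
          exact_mod_cast this
        · left; exact_mod_cast (by omega : na ≠ 0))]
      have hmods : PySem.Int.mod (na : Int) 10 + PySem.Int.mod (nb : Int) 10
          = ((na % 10 + nb % 10 : Nat) : Int) := by
        rw [show ((10 : Int)) = ((10 : Nat) : Int) by rfl, PySem.Int.mod_natCast,
          PySem.Int.mod_natCast]
        push_cast; ring
      have hshift : hardN na nb (f + 1)
          = (decide (10 ≤ na % 10 + nb % 10) || hardN (na / 10) (nb / 10) f) := by
        rw [Bool.eq_iff_iff]
        simp only [hardN, List.any_eq_true, List.mem_range, decide_eq_true_eq, Bool.or_eq_true]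
        constructor
        · rintro ⟨k, hk, hsum⟩
          cases k with
          | zero => left; simpa [dig] using hsum
          | succ k => right; exact ⟨k, by omega, by rwa [dig_succ, dig_succ] at hsum⟩
        · rintro (hsum | ⟨k, hk, hsum⟩)
          · exact ⟨0, by omega, by simpa [dig] using hsum⟩
          · exact ⟨k + 1, by omega, by rw [dig_succ, dig_succ]; exact hsum⟩
      by_cases hd : 10 ≤ na % 10 + nb % 10
      · rw [if_pos (by rw [hmods]; exact_mod_cast hd), hshift, if_pos (by simp [hd])]
      · rw [if_neg (by rw [hmods]; exact_mod_cast (by omega : ¬ (10 : Int) ≤ ((na % 10 + nb % 10 : Nat) : Int)))]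
        rw [show ((10 : Int)) = ((10 : Nat) : Int) from rfl, PySem.Int.floordiv_natCast,
          PySem.Int.floordiv_natCast]
        have hdiva : na / 10 < 10 ^ f := by
          have hp : 10 ^ (f + 1) = 10 ^ f * 10 := by ring
          omega
        have hdivb : nb / 10 < 10 ^ f := by
          have hp : 10 ^ (f + 1) = 10 ^ f * 10 := by ring
          omega
        rw [ih (na / 10) (nb / 10) hdiva hdivb, hshift]
        simp [hd]

theorem len_msb_le (n : Nat) : (msb n).length ≤ n + 1 := by
  rw [msb]
  split
  · simp
  · rename_i h
    have ih := len_msb_le (n / 10)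
    simp only [List.length_append, List.length_singleton]
    omega
termination_by n
decreasing_by exact Nat.div_lt_self (by omega) (by omega)

theorem hardN_stable (na nb m L : Nat) (hna : na < 10 ^ m) (hnb : nb < 10 ^ m) (h : m ≤ L) :
    hardN na nb L = hardN na nb m := by
  rw [Bool.eq_iff_iff, hardN, hardN, List.any_eq_true, List.any_eq_true]
  constructor
  · rintro ⟨k, hk, hP⟩
    simp only [List.mem_range, decide_eq_true_eq] at hk hP
    by_cases hkm : k < m
    · exact ⟨k, by simpa using hkm, by simpa using hP⟩
    · rw [dig_vanish hna (by omega), dig_vanish hnb (by omega)] at hP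
      omega
  · rintro ⟨k, hk, hP⟩
    simp only [List.mem_range] at hk
    exact ⟨k, by simp; omega, hP⟩

-- ===== VERDICT (by name: the statement is the Claim_ definition above) =====
theorem solve_spec : Claim_equal_solve := by
  intro a b _ hpre
  obtain ⟨ha, hb⟩ := hpre
  unfold Spec_solve
  set na := a.toNat with hna
  set nb := b.toNat with hnb
  have hacast : (na : Int) = a := Int.toNat_of_nonneg ha
  have hbcast : (nb : Int) = b := Int.toNat_of_nonneg hb
  set la := (msb na).length
  set lb := (msb nb).length
  set f := a.natAbs + b.natAbs + 1 with hf
  have hfn : f = na + nb + 1 := by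
    rw [hf, hna, hnb]; omega
  have hpow : ∀ (n m : Nat), n ≤ m → n < 10 ^ m := by
    intro n m h
    calc n < 2 ^ n := Nat.lt_two_pow_self
    _ ≤ 10 ^ n := Nat.pow_le_pow_left (by omega) _
    _ ≤ 10 ^ m := Nat.pow_le_pow_right (by omega) h
  have hnaf : na < 10 ^ f := hpow _ _ (by omega)
  have hnbf : nb < 10 ^ f := hpow _ _ (by omega)
  have hB : solve_alt a b = if hardN na nb f then "Hard" else "Easy" := by
    rw [solve_alt, ← hacast, ← hbcast]
    have hth : (((na : Int)).natAbs + ((nb : Int)).natAbs + 1) = f := by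
      rw [hfn]; simp
    rw [hth]
    exact loopB_char f na nb hnaf hnbf
  have hA := solve_char a b ha hb
  rw [hA, hB, ← hna, ← hnb]
  have hm : max la lb ≤ f := by
    have h1 : la ≤ na + 1 := len_msb_le na
    have h2 : lb ≤ nb + 1 := len_msb_le nb
    omega
  have hnam : na < 10 ^ (max la lb) :=
    (lt_pow_len_msb na).trans_le (Nat.pow_le_pow_right (by omega) (le_max_left _ _))
  have hnbm : nb < 10 ^ (max la lb) :=
    (lt_pow_len_msb nb).trans_le (Nat.pow_le_pow_right (by omega) (le_max_right _ _))
  rw [hardN_stable na nb (max la lb) f hnam hnbm hm,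
    hardN_stable na nb (max la lb) (max la lb) hnam hnbm (le_refl _)]
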